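-- pv_equiv track=rewrite | github.com/ragnhmyr/Advent-of-Code | 2025/3_joltage.py | find_largest_subsequence
-- ===== SOURCE A (Python) =====
-- def find_largest_subsequence(original_string: str, target_length: int) -> str:
--     number_of_deletions_allowed = len(original_string) - target_length
--     chosen_digits_stack = []
--
--     for current_digit in original_string:
--         # Remove smaller digits from the stack if the current digit is larger
--         # and we still have deletions available
--         while (number_of_deletions_allowed > 0
--                and chosen_digits_stack
--                and chosen_digits_stack[-1] < current_digit):
--             chosen_digits_stack.pop()
--             number_of_deletions_allowed -= 1
--
--         chosen_digits_stack.append(current_digit)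
--
--     # If we still have deletions allowed, remove digits from the end
--     if number_of_deletions_allowed > 0:
--         chosen_digits_stack = chosen_digits_stack[:-number_of_deletions_allowed]
--
--     return "".join(chosen_digits_stack)
-- ===== SOURCE B (Python) =====
-- def find_largest_subsequence(original_string: str, target_length: int) -> str:
--     # Greedy selection: repeatedly pick the leftmost maximal character in the
--     # feasible window, instead of A's monotonic-stack pass.
--     s = original_string
--     out = []
--     start = 0
--     k = target_length
--     while k > 0 and len(s) - start > k:
--         window = s[start:len(s) - k + 1]
--         c = max(window)
--         i = window.index(c)
--         out.append(c)
--         start = start + i + 1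
--         k -= 1
--     if k > 0:
--         out.append(s[start:])  # fewer remaining characters than needed: take them all
--     return "".join(out)
-- ===== Notes on version B (the rewrite author's own statement) =====
-- stated objective: alternative
-- what changed: Replaced the single-pass monotonic stack (pop smaller digits while deletions remain, then trim the tail) by a greedy selection loop that, for each output position, scans the feasible window for the leftmost maximal character and continues from just after it.
import Mathlib
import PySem

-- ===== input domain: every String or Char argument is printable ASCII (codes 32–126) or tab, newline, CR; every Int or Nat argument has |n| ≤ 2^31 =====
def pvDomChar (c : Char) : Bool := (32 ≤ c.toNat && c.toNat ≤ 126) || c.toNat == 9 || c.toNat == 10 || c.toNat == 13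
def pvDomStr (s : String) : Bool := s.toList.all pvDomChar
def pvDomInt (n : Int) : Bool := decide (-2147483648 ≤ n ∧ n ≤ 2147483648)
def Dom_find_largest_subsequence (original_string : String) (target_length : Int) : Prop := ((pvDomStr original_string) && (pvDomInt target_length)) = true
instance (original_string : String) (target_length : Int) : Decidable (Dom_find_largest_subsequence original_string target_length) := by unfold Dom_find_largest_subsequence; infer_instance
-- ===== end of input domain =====

-- A = monotonic-stack pass; B = greedy loop picking the leftmost window maximum per output position; proved to return the same string (alternative decomposition, not faster).

-- ===== PORT A =====
-- the inner while loop (stack kept reversed: head = Python's stack[-1])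
def pvPopA (d : Int) (st : List Char) (c : Char) : Int × List Char :=
  match st with
  | [] => (d, [])
  | t :: rest => if d > 0 ∧ t < c then pvPopA (d - 1) rest c else (d, t :: rest)

-- one iteration of the for loop
def pvStepA (acc : Int × List Char) (c : Char) : Int × List Char :=
  let p := pvPopA acc.1 acc.2 c
  (p.1, c :: p.2)

def find_largest_subsequence (original_string : String) (target_length : Int) : String :=
  let s := original_string.toList
  let r := s.foldl pvStepA ((s.length : Int) - target_length, [])
  let kept := r.2.reverse
  String.mk (if r.1 > 0 then PySem.List.slice kept none (some (-r.1)) else kept)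

-- ===== PORT B =====
-- the while loop of Source B: (start, k, out) are the loop state
def pvPickB (s : List Char) (start : Nat) (k : Int) (out : List Char) : List Char :=
  if _h : k > 0 ∧ (s.length : Int) - (start : Int) > k then
    let window := PySem.List.slice s (some (start : Int)) (some ((s.length : Int) - k + 1))
    match PySem.List.max? window (fun c => c) with
    | none => out            -- unreachable: the window is nonempty
    | some c =>
      match PySem.List.index? window c with
      | none => out          -- unreachable: c ∈ window
      | some i => pvPickB s (start + i + 1) (k - 1) (out ++ [c])
  else if k > 0 then out ++ s.drop start  -- s[start:] appended, then joined
  else out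
termination_by s.length - start
decreasing_by omega

def find_largest_subsequence_alt (original_string : String) (target_length : Int) : String :=
  String.mk (pvPickB original_string.toList 0 target_length [])

-- ===== PRECONDITION & SPEC =====
def Spec_find_largest_subsequence (original_string : String) (target_length : Int) (out : String) : Prop := out = find_largest_subsequence_alt original_string target_length
instance (original_string : String) (target_length : Int) (out : String) : Decidable (Spec_find_largest_subsequence original_string target_length out) := by unfold Spec_find_largest_subsequence; infer_instance

-- ===== CLAIM (what is proved, stated in full; the proofs are below) =====
def Claim_equal_find_largest_subsequence : Prop := ∀ (original_string : String) (target_length : Int), Dom_find_largest_subsequence original_string target_length → Spec_find_largest_subsequence original_string target_length (find_largest_subsequence original_string target_length)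

-- ===== LEMMAS AND PROOFS =====

-- the recursive form of B's greedy (proof helper; pvPickB is its tail-recursive loop)
def pvPickRec (s : List Char) (k : Int) : List Char :=
  if k ≤ 0 then []
  else if (s.length : Int) ≤ k then s
  else
    let w := s.take (s.length - k.toNat + 1)
    match PySem.List.max? w (fun c => c) with
    | none => []           -- unreachable: the window is nonempty
    | some c =>
      match PySem.List.index? w c with
      | none => []         -- unreachable: c ∈ w
      | some i => c :: pvPickRec (s.drop (i + 1)) (k - 1)
termination_by s.length
decreasing_by
  simp only [List.length_drop]
  omega

-- A's whole computation on the character list (trim included)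
def pvAList (s : List Char) (t : Int) : List Char :=
  let r := s.foldl pvStepA ((s.length : Int) - t, [])
  let kept := r.2.reverse
  if r.1 > 0 then PySem.List.slice kept none (some (-r.1)) else kept

theorem pvAList_spec (s : String) (t : Int) :
    find_largest_subsequence s t = String.mk (pvAList s.toList t) := rfl

-- pops preserve d - |st|
theorem pvPopA_count (st : List Char) (d : Int) (c : Char) :
    (pvPopA d st c).1 - ((pvPopA d st c).2.length : Int) = d - st.length := by
  induction st generalizing d with
  | nil => simp [pvPopA]
  | cons t rest ih =>
    simp only [pvPopA]
    split
    · have := ih (d - 1)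
      simp only [List.length_cons] at this ⊢
      push_cast at this ⊢ ; omega
    · simp

-- pops return a sub-collection of the stack
theorem pvPopA_mem (st : List Char) (d : Int) (c : Char) :
    ∀ x ∈ (pvPopA d st c).2, x ∈ st := by
  induction st generalizing d with
  | nil => simp [pvPopA]
  | cons t rest ih =>
    simp only [pvPopA]
    split
    · intro x hx ; exact List.mem_cons_of_mem _ (ih (d - 1) x hx)
    · intro x hx ; exact hx

theorem pvFoldA_count (s : List Char) (d : Int) (st : List Char) :
    (s.foldl pvStepA (d, st)).1 - ((s.foldl pvStepA (d, st)).2.length : Int)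
      = d - st.length - s.length := by
  induction s generalizing d st with
  | nil => simp
  | cons c s' ih =>
    simp only [List.foldl_cons]
    have h1 := pvPopA_count st d c
    have h2 := ih (pvPopA d st c).1 (c :: (pvPopA d st c).2)
    simp only [pvStepA]
    simp only [List.length_cons] at h1 h2 ⊢
    push_cast at h1 h2 ⊢
    omega

theorem pvFoldA_mem (s : List Char) (d : Int) (st : List Char) :
    ∀ x ∈ (s.foldl pvStepA (d, st)).2, x ∈ st ∨ x ∈ s := by
  induction s generalizing d st with
  | nil => intro x hx ; exact Or.inl hx
  | cons c s' ih =>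
    intro x hx
    simp only [List.foldl_cons] at hx
    rcases ih (pvPopA d st c).1 (c :: (pvPopA d st c).2) x hx with h | h
    · rcases List.mem_cons.mp h with h | h
      · exact Or.inr (h ▸ List.mem_cons_self ..)
      · exact Or.inl (pvPopA_mem st d c x h)
    · exact Or.inr (List.mem_cons_of_mem _ h)

-- no deletions left: the loop just copies
theorem pvPopA_nopop (st : List Char) (d : Int) (c : Char) (hd : d ≤ 0) :
    pvPopA d st c = (d, st) := by
  cases st with
  | nil => rfl
  | cons t rest => simp only [pvPopA] ; rw [if_neg] ; omega

theorem pvFoldA_nopop (s : List Char) (d : Int) (st : List Char) (hd : d ≤ 0) :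
    s.foldl pvStepA (d, st) = (d, s.reverse ++ st) := by
  induction s generalizing st with
  | nil => simp
  | cons c s' ih =>
    simp only [List.foldl_cons, pvStepA, pvPopA_nopop st d c hd]
    rw [ih (c :: st)]
    simp

-- enough budget and all smaller: everything is popped
theorem pvPopA_all (st : List Char) (d : Int) (c : Char)
    (hlt : ∀ x ∈ st, x < c) (hd : (st.length : Int) ≤ d) :
    pvPopA d st c = (d - st.length, []) := by
  induction st generalizing d with
  | nil => simp [pvPopA]
  | cons t rest ih =>
    simp only [pvPopA]
    rw [if_pos]
    · rw [ih (d - 1) (fun x hx => hlt x (List.mem_cons_of_mem _ hx)) (by simp at hd ⊢ ; omega)]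
      simp only [List.length_cons, Prod.mk.injEq]
      exact ⟨by push_cast ; ring, trivial⟩
    · exact ⟨by simp at hd ; omega, hlt t (List.mem_cons_self ..)⟩

-- a bottom element never inspected is carried through the pop loop
theorem pvPopA_append (st : List Char) (d : Int) (c b : Char)
    (hb : d - (st.length : Int) > 0 → ¬ b < c) :
    pvPopA d (st ++ [b]) c = ((pvPopA d st c).1, (pvPopA d st c).2 ++ [b]) := by
  induction st generalizing d with
  | nil =>
    simp only [List.nil_append, pvPopA]
    simp only [List.length_nil, Nat.cast_zero, sub_zero] at hb
    rw [if_neg (fun h => hb h.1 h.2)]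
  | cons t rest ih =>
    simp only [List.cons_append, pvPopA]
    by_cases h : d > 0 ∧ t < c
    · rw [if_pos h, if_pos h, ih (d - 1) ?_]
      intro h'
      apply hb
      simp only [List.length_cons]
      push_cast at h' ⊢ ; omega
    · rw [if_neg h, if_neg h] ; simp

-- a bottom element never popped is carried through the whole fold
theorem pvFoldA_append (s : List Char) (d : Int) (st : List Char) (b : Char)
    (hb : ∀ j (hj : j < s.length), (j : Int) < d - st.length → ¬ b < s[j]) :
    s.foldl pvStepA (d, st ++ [b])
      = ((s.foldl pvStepA (d, st)).1, (s.foldl pvStepA (d, st)).2 ++ [b]) := by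
  induction s generalizing d st with
  | nil => simp
  | cons c s' ih =>
    simp only [List.foldl_cons, pvStepA]
    rw [pvPopA_append st d c b (fun h => by simpa using hb 0 (by simp) (by simpa using h))]
    dsimp only
    rw [← List.cons_append, ih (pvPopA d st c).1 (c :: (pvPopA d st c).2) ?_]
    intro j hj hjd
    have hcount := pvPopA_count st d c
    have : ((j + 1 : Nat) : Int) < d - st.length := by
      simp only [List.length_cons] at hjd ; push_cast at hjd ⊢ ; omega
    simpa using hb (j + 1) (by simpa using hj) this

-- leftover budget covers the whole stack: the trim empties everything
theorem pvAList_of_le (s : List Char) (t : Int) (ht : t ≤ 0) :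
    pvAList s t = [] := by
  unfold pvAList
  dsimp only
  have hc := pvFoldA_count s ((s.length : Int) - t) []
  set r := s.foldl pvStepA ((s.length : Int) - t, []) with hr
  simp only [List.length_nil, Nat.cast_zero, sub_zero] at hc
  -- r.1 = |r.2| - t ≥ |r.2|
  have h1 : r.1 = (r.2.length : Int) - t := by omega
  by_cases h2 : r.2.length = 0
  · have hnil : r.2.reverse = [] := by simp [List.eq_nil_of_length_eq_zero h2]
    rw [hnil]
    split_ifs with h
    · simp [PySem.List.slice]
    · rfl
  · rw [if_pos (by omega)]
    have h3 : -r.1 = -((r.1.toNat : Nat) : Int) := by omega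
    rw [h3, PySem.List.slice_to_neg_natCast _ _ (by omega)]
    simp only [List.length_reverse]
    have : r.2.length - r.1.toNat = 0 := by omega
    simp [this]

-- no budget at all: A returns the whole string
theorem pvAList_of_ge (s : List Char) (t : Int) (ht : (s.length : Int) ≤ t) :
    pvAList s t = s := by
  unfold pvAList
  dsimp only
  rw [pvFoldA_nopop s _ [] (by omega)]
  simp only [List.append_nil, List.reverse_reverse]
  rw [if_neg (by omega)]

-- THE MAIN EQUIVALENCE on lists
theorem pvAList_eq_pickRec (s : List Char) (t : Int) : pvAList s t = pvPickRec s t := by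
  by_cases ht0 : t ≤ 0
  · rw [pvAList_of_le s t ht0] ; unfold pvPickRec ; rw [if_pos ht0]
  · by_cases htn : (s.length : Int) ≤ t
    · rw [pvAList_of_ge s t htn] ; unfold pvPickRec ; rw [if_neg ht0, if_pos htn]
    · -- 1 ≤ t < |s| : the greedy step
      rw [not_le] at ht0 htn
      -- abbreviations
      set n := s.length with hn
      have hk1 : 1 ≤ t.toNat := by omega
      have hkn : t.toNat < n := by omega
      set k := t.toNat with hkdef
      have htk : t = (k : Int) := by omega
      set w := s.take (n - k + 1) with hw
      have hwlen : w.length = n - k + 1 := by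
        rw [hw, List.length_take] ; omega
      have hwne : w ≠ [] := by
        intro h ; rw [h] at hwlen ; simp only [List.length_nil] at hwlen ; omega
      -- the window max and its first position
      obtain ⟨c, hc⟩ : ∃ c, PySem.List.max? w (fun x => x) = some c := by
        rcases h : PySem.List.max? w (fun x => x) with _ | c
        · exact absurd ((PySem.List.max?_eq_none_iff w _).mp h) hwne
        · exact ⟨c, rfl⟩
      have hcmem : c ∈ w := PySem.List.max?_mem hc
      have hcmax : ∀ y ∈ w, y ≤ c := PySem.List.max?_isMax hc
      obtain ⟨i, hi⟩ : ∃ i, PySem.List.index? w c = some i := by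
        rcases h : PySem.List.index? w c with _ | i
        · exact absurd hcmem ((PySem.List.index?_eq_none_iff w c).mp h)
        · exact ⟨i, rfl⟩
      obtain ⟨hiw, hwi, hfirst⟩ := PySem.List.getElem_of_index?_eq_some hi
      have hiled : i ≤ n - k := by omega
      -- split s = take i s ++ c :: drop (i+1) s
      have hilen : i < n := by omega
      have hsi : s[i]'hilen = c := by
        rw [← hwi]
        simp only [hw, List.getElem_take]
      have hsplit : s = s.take i ++ c :: s.drop (i + 1) := by
        conv_lhs => rw [← List.take_append_drop i s]
        congr 1
        rw [← hsi]
        exact (List.getElem_cons_drop hilen).symm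
      -- every char strictly before position i is < c
      have hsmall : ∀ x ∈ s.take i, x < c := by
        intro x hx
        obtain ⟨j, hj, hxj⟩ := List.getElem_of_mem hx
        rw [List.length_take] at hj
        have hji : j < i := by omega
        have hjw : j < w.length := by omega
        have hxw : w[j]'hjw = x := by
          simp only [hw, List.getElem_take]
          simpa only [List.getElem_take] using hxj
        have hne : x ≠ c := by rw [← hxw] ; exact hfirst j hji
        exact lt_of_le_of_ne (hcmax x (hxw ▸ List.getElem_mem hjw)) hne
      -- run A over the prefix
      set d0 : Int := (n : Int) - t with hd0
      have hd0i : (i : Int) ≤ d0 := by omega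
      set r1 := (s.take i).foldl pvStepA (d0, []) with hr1
      have hr1c : r1.1 - (r1.2.length : Int) = d0 - i := by
        have := pvFoldA_count (s.take i) d0 []
        rw [← hr1] at this
        simp only [List.length_nil, Nat.cast_zero, sub_zero, List.length_take] at this
        have : r1.1 - (r1.2.length : Int) = d0 - (min i n : Nat) := this
        rwa [Nat.min_eq_left hilen.le] at this
      have hr1m : ∀ x ∈ r1.2, x < c := by
        intro x hx
        rcases pvFoldA_mem (s.take i) d0 [] x (hr1 ▸ hx) with h | h
        · simp at h
        · exact hsmall x h
      -- the arrival of c empties the stack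
      have hstep : pvStepA r1 c = (d0 - i, [c]) := by
        simp only [pvStepA]
        rw [pvPopA_all r1.2 r1.1 c hr1m (by omega)]
        have : r1.1 - (r1.2.length : Int) = d0 - i := hr1c
        simp [this]
      -- run A over the suffix, with c pinned at the bottom
      set s2 := s.drop (i + 1) with hs2
      have hs2len : s2.length = n - (i + 1) := by rw [hs2, List.length_drop]
      set r2 := s2.foldl pvStepA (d0 - i, []) with hr2
      have hcond : ∀ j (hj : j < s2.length),
          (j : Int) < (d0 - i) - ((([] : List Char).length : Nat) : Int) → ¬ c < s2[j] := by
        intro j hj hjd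
        simp only [List.length_nil, Nat.cast_zero, sub_zero] at hjd
        have hjn : i + 1 + j < n := by omega
        have hjw : i + 1 + j < w.length := by omega
        have heq : s2[j] = w[i + 1 + j]'hjw := by
          simp only [hs2, List.getElem_drop, hw, List.getElem_take]
        rw [heq]
        exact not_lt.mpr (hcmax _ (List.getElem_mem hjw))
      have hbot : s2.foldl pvStepA (d0 - i, [c]) = (r2.1, r2.2 ++ [c]) := by
        have h := pvFoldA_append s2 (d0 - i) [] c hcond
        rw [hr2]
        simpa using h
      -- assemble the A run over all of s
      have hrun : s.foldl pvStepA (d0, []) = (r2.1, r2.2 ++ [c]) := by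
        conv_lhs => rw [hsplit]
        rw [List.foldl_append, List.foldl_cons, ← hr1, hstep, hbot]
      have hr2c : r2.1 - (r2.2.length : Int) = (d0 - i) - s2.length := by
        have := pvFoldA_count s2 (d0 - i) []
        rw [← hr2] at this ; simpa using this
      have hr2le : r2.1 ≤ (r2.2.length : Int) + 1 - (k : Int) := by
        rw [hs2len] at hr2c ; omega
      -- the trim commutes with the picked head
      have hA : pvAList s t = c :: pvAList s2 (t - 1) := by
        unfold pvAList
        dsimp only
        rw [hrun]
        have hrun2 : s2.foldl pvStepA ((s2.length : Int) - (t - 1), []) = r2 := by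
          rw [hr2]
          have heq2 : (s2.length : Int) - (t - 1) = d0 - (i : Int) := by omega
          rw [heq2]
        rw [hrun2]
        simp only [List.reverse_append, List.reverse_cons, List.reverse_nil, List.nil_append,
          List.cons_append, List.nil_append]
        by_cases hpos : r2.1 > 0
        · rw [if_pos hpos, if_pos hpos]
          have hneg : -r2.1 = -((r2.1.toNat : Nat) : Int) := by omega
          rw [hneg, PySem.List.slice_to_neg_natCast _ _ (by omega),
            PySem.List.slice_to_neg_natCast _ _ (by omega)]
          simp only [List.length_cons, List.length_reverse]
          have htoNat : r2.1.toNat ≤ r2.2.length := by omega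
          rw [Nat.succ_sub htoNat, List.take_succ_cons]
        · rw [if_neg hpos, if_neg hpos]
      -- B takes the same step
      have hB : pvPickRec s t = c :: pvPickRec s2 (t - 1) := by
        rw [pvPickRec]
        rw [if_neg (by omega), if_neg (by omega)]
        have htw : s.take (s.length - t.toNat + 1) = w := by rw [hw, hn, hkdef]
        simp only [htw, hc]
        split
        · next heq =>
            rw [hi] at heq
            exact absurd heq (by simp)
        · next i' heq =>
            rw [hi] at heq
            injection heq with h2
            subst h2
            rw [← hs2]
      rw [hA, hB, pvAList_eq_pickRec s2 (t - 1)]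
termination_by s.length
decreasing_by
  simp only [List.length_drop]
  omega

-- the loop of Source B computes the recursive greedy on the remaining suffix
theorem pvPickB_eq_rec (s : List Char) (start : Nat) (k : Int) (out : List Char)
    (hs : start ≤ s.length) :
    pvPickB s start k out = out ++ pvPickRec (s.drop start) k := by
  rw [pvPickB]
  by_cases h : k > 0 ∧ (s.length : Int) - (start : Int) > k
  · rw [dif_pos h]
    have hk1 : (1 : Int) ≤ k := h.1
    have hkn : (start : Int) + k < (s.length : Int) := by omega
    have hb : (s.length : Int) - k + 1 = ((s.length - k.toNat + 1 : Nat) : Int) := by omega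
    have hwin : PySem.List.slice s (some (start : Int)) (some ((s.length : Int) - k + 1))
        = (s.drop start).take ((s.drop start).length - k.toNat + 1) := by
      rw [hb, PySem.List.slice_natCast]
      congr 1
      simp only [List.length_drop]
      omega
    rw [pvPickRec]
    rw [if_neg (by omega), if_neg (by simp only [List.length_drop] ; omega)]
    rw [hwin]
    simp only [List.length_drop]
    rcases hm : PySem.List.max? ((s.drop start).take (s.length - start - k.toNat + 1))
        (fun c => c) with _ | c
    · simp
    · dsimp only
      rcases hidx : PySem.List.index?
          ((s.drop start).take (s.length - start - k.toNat + 1)) c with _ | i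
      · simp
      · dsimp only
        obtain ⟨hiw, -, -⟩ := PySem.List.getElem_of_index?_eq_some hidx
        simp only [List.length_take, List.length_drop] at hiw
        rw [pvPickB_eq_rec s (start + i + 1) (k - 1) (out ++ [c]) (by omega)]
        rw [List.drop_drop]
        have heq3 : start + (i + 1) = start + i + 1 := by omega
        rw [heq3, List.append_assoc, List.singleton_append]
  · rw [dif_neg h]
    rw [pvPickRec]
    by_cases hk : k > 0
    · have hlen : ((s.drop start).length : Int) ≤ k := by
        simp only [List.length_drop] ; omega
      rw [if_pos hk, if_neg (show ¬ k ≤ 0 by omega), if_pos hlen]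
    · rw [if_neg hk, if_pos (show k ≤ 0 by omega)]
      simp
termination_by s.length - start
decreasing_by omega

-- ===== VERDICT (by name: the statement is the Claim_ definition above) =====
theorem find_largest_subsequence_spec : Claim_equal_find_largest_subsequence := by
  intro s t _
  unfold Spec_find_largest_subsequence find_largest_subsequence_alt
  rw [pvAList_spec, pvAList_eq_pickRec, pvPickB_eq_rec s.toList 0 t [] (by omega)]
  simp
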